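-- pv_equiv track=rewrite | github.com/JngHyun/Algorithm | 프로그래머스/L1_kakao/신규아이디추천.py | solution
-- ===== SOURCE A (Python) =====
-- def solution(new_id):
--     answer = ''
--     used = []
--     used += [i for i in range(ord('a'),ord('z')+1)]
--     used += [i for i in range(ord('0'),ord('9')+1)]
--     used += [ord('-'),ord('_'),ord('.')]
--
--     new_id = new_id.lower()
--
--     for a in new_id:
--         if ord(a) in used:
--             answer+=a
--
--     temp=answer[0]
--     for i in range(1,len(answer)):
--         if answer[i]=='.' and temp[-1] == '.':
--             temp+=''
--         else:
--             temp+=answer[i]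
--     answer = temp
--
--
--     if answer[0] == '.':
--         answer = answer[1:]
--     if len(answer)!= 0 and answer[-1] =='.':
--          answer = answer[:-1]
--
--     if len(answer) ==0:
--         answer = 'a'
--
--     if len(answer) >=16:
--         answer = answer[:15]
--
--     if len(answer)!= 0 and answer[-1] =='.':
--          answer = answer[:-1]
--
--     if len(answer)<=2:
--         temp = answer[-1]
--         while len(answer)!=3:
--             answer+=temp
--
--     return answer
-- ===== SOURCE B (Python) =====
-- def solution(new_id):
--     # one fused pass: keep allowed chars, collapsing runs of '.' as we go
--     out = []
--     for ch in new_id.lower():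
--         if ('a' <= ch <= 'z' or '0' <= ch <= '9' or ch in '-_.') \
--                 and not (ch == '.' and out and out[-1] == '.'):
--             out.append(ch)
--     s = ''.join(out).strip('.')
--     if not s:
--         s = 'a'
--     s = s[:15].rstrip('.')
--     return s + s[-1] * (3 - len(s))
-- ===== Notes on version B (the rewrite author's own statement) =====
-- stated objective: simpler
-- what changed: A filters characters into a string and then runs a second index loop (plus manual edge-dot slicing and a while-append loop) to collapse consecutive dots; B does the filtering and dot-collapsing in one fused pass accumulating into a list, then finishes with strip/slice/rstrip and a single arithmetic pad expression, avoiding A's repeated string concatenation.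
-- crash fix: A raises IndexError (at answer[0]) exactly when the lowercased input contains no character of [a-z0-9._-]; B returns the default id string of three letters a there. — e.g. on solution("!"): A raises IndexError, B returns "aaa"
import Mathlib
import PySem

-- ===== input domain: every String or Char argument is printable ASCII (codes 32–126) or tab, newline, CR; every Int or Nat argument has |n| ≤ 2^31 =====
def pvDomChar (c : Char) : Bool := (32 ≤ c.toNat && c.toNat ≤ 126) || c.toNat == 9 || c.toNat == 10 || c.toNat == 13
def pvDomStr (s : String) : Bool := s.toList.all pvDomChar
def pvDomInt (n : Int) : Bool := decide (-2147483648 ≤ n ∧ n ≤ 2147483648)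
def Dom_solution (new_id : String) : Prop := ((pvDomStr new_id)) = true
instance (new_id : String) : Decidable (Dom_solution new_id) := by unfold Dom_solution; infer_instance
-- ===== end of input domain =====

-- B replaces A's two scans (filter pass, then an index loop collapsing '..') by one fused
-- left-to-right pass accumulating into a list, plus strip/slice post-processing (objective:
-- simpler; a timing run also measured B faster). Equal return value wherever A returns
-- (Pre_); where A raises IndexError (no valid character) B returns the padded default id.

-- ===== PORT A =====
-- Literal port of A.  Where the Python raises IndexError (`answer[0]` on an empty `answer`)
-- the port returns "" — exactly those inputs are excluded by Pre_solution.
def solution (new_id : String) : String :=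
  let used : List Int :=
    PySem.List.pyRange 97 123 1 ++ PySem.List.pyRange 48 58 1 ++ [45, 95, 46]
  let lowered := (PySem.Str.lower new_id).toList
  let answer : List Char :=
    lowered.foldl (fun acc a => if ((a.toNat : Int) ∈ used) then acc ++ [a] else acc) []
  match answer with
  | [] => ""  -- Python: `temp = answer[0]` raises IndexError here; outside Pre_solution
  | c0 :: rest =>
    -- temp = answer[0]; for i in range(1, len(answer)): … answer[i] …  (the same chars, in order)
    let temp := rest.foldl
      (fun t x => if x = '.' ∧ t.getLast? = some '.' then t else t ++ [x]) [c0]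
    let a1 := if temp.head? = some '.' then temp.tail else temp
    let a2 := if a1.length ≠ 0 ∧ a1.getLast? = some '.' then a1.dropLast else a1
    let a3 := if a2.length = 0 then ['a'] else a2
    let a4 := if 16 ≤ a3.length then a3.take 15 else a3
    let a5 := if a4.length ≠ 0 ∧ a4.getLast? = some '.' then a4.dropLast else a4
    -- temp = answer[-1]; while len(answer) != 3: answer += temp   (appends the fixed last char until length 3)
    let a6 := if a5.length ≤ 2 then
        a5 ++ List.replicate (3 - a5.length) (PySem.List.pyGetD a5 (-1) 'a')
      else a5
    String.ofList a6

-- ===== PORT B =====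
def solution_alt (new_id : String) : String :=
  let out : List Char :=
    (PySem.Str.lower new_id).toList.foldl
      (fun acc ch =>
        if (('a' ≤ ch ∧ ch ≤ 'z') ∨ ('0' ≤ ch ∧ ch ≤ '9') ∨ ch ∈ ['-', '_', '.'])
            ∧ ¬(ch = '.' ∧ acc ≠ [] ∧ acc.getLast? = some '.')
        then acc ++ [ch] else acc) []
  let s1 := PySem.Chars.stripChars out ['.']
  let s2 := if s1 = [] then ['a'] else s1
  -- s[:15].rstrip('.') — drop the trailing '.' characters (exact port of str.rstrip('.'))
  let s3 := ((s2.take 15).reverse.dropWhile (fun c => (['.'] : List Char).contains c)).reverse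
  -- s + s[-1] * (3 - len(s)) — Nat subtraction: Python's negative repeat count gives ''
  String.ofList (s3 ++ List.replicate (3 - s3.length) (PySem.List.pyGetD s3 (-1) 'a'))

-- ===== PRECONDITION & SPEC =====
-- Pre_ excludes exactly the inputs whose lowercase form has no character in [a-z0-9._-]:
-- there the Python A raises IndexError at `answer[0]`.
def Pre_solution (new_id : String) : Prop :=
  (PySem.Chars.lower new_id.toList).any
    (fun c => ('a' ≤ c && c ≤ 'z') || ('0' ≤ c && c ≤ '9') ||
      (['-', '_', '.'] : List Char).contains c) = true
instance (new_id : String) : Decidable (Pre_solution new_id) := by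
  unfold Pre_solution; infer_instance

def pvWitness_solution : String := "abc"

-- A raises IndexError exactly when the lowercased input contains no character of [a-z0-9._-]; B returns the padded default id (pvRaiseWitnessOut_solution) there.
def Raises_solution (new_id : String) : Prop :=
  ∀ c ∈ PySem.Chars.lower new_id.toList,
    ¬(('a' ≤ c ∧ c ≤ 'z') ∨ ('0' ≤ c ∧ c ≤ '9') ∨ c ∈ (['-', '_', '.'] : List Char))
instance (new_id : String) : Decidable (Raises_solution new_id) := by
  unfold Raises_solution; infer_instance

def pvRaiseWitness_solution : String := "!"
def pvRaiseWitnessOut_solution : String := "aaa"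

def Spec_solution (new_id : String) (out : String) : Prop := out = solution_alt new_id
instance (new_id : String) (out : String) : Decidable (Spec_solution new_id out) := by
  unfold Spec_solution; infer_instance

-- ===== CLAIM (what is proved, stated in full; the proofs are below) =====
def Claim_equal_solution : Prop :=
  ∀ (new_id : String), Dom_solution new_id → Pre_solution new_id →
    Spec_solution new_id (solution new_id)

def Claim_raises_solution : Prop :=
  (∀ (new_id : String), Dom_solution new_id → Raises_solution new_id → ¬ Pre_solution new_id) ∧
  (Dom_solution (pvRaiseWitness_solution) ∧ Raises_solution (pvRaiseWitness_solution) ∧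
    solution_alt (pvRaiseWitness_solution) = pvRaiseWitnessOut_solution)

-- ===== LEMMAS AND PROOFS =====

-- the shared character predicate (B's form)
def pvOk (c : Char) : Bool :=
  ('a' ≤ c && c ≤ 'z') || ('0' ≤ c && c ≤ '9') || (['-', '_', '.'] : List Char).contains c

-- A's numeric membership test equals B's character comparisons
lemma pv_cond_eq (c : Char) :
    (((c.toNat : Int)) ∈ (PySem.List.pyRange 97 123 1 ++ PySem.List.pyRange 48 58 1 ++
      ([45, 95, 46] : List Int))) ↔ pvOk c = true := by
  unfold pvOk
  simp only [Bool.or_eq_true, Bool.and_eq_true, decide_eq_true_eq, List.contains_eq_mem,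
    List.mem_cons, List.not_mem_nil, or_false]
  simp only [List.mem_append, PySem.List.mem_pyRange_one, List.mem_cons, List.not_mem_nil, or_false]
  rw [Char.le_def, Char.le_def, Char.le_def, Char.le_def, Char.ext_iff, Char.ext_iff, Char.ext_iff,
    UInt32.le_iff_toNat_le, UInt32.le_iff_toNat_le, UInt32.le_iff_toNat_le, UInt32.le_iff_toNat_le,
    UInt32.ext_iff, UInt32.ext_iff, UInt32.ext_iff]
  show (97 ≤ (c.toNat : Int) ∧ (c.toNat : Int) < 123 ∨ 48 ≤ (c.toNat : Int) ∧ (c.toNat : Int) < 58) ∨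
      (c.toNat : Int) = 45 ∨ (c.toNat : Int) = 95 ∨ (c.toNat : Int) = 46 ↔
    (97 ≤ c.toNat ∧ c.toNat ≤ 122 ∨ 48 ≤ c.toNat ∧ c.toNat ≤ 57) ∨
      c.toNat = 45 ∨ c.toNat = 95 ∨ c.toNat = 46
  omega

lemma pv_ok_iff (c : Char) :
    (('a' ≤ c ∧ c ≤ 'z') ∨ ('0' ≤ c ∧ c ≤ '9') ∨ c ∈ (['-', '_', '.'] : List Char)) ↔
      pvOk c = true := by
  unfold pvOk
  simp
  tauto

-- "no two adjacent dots"
def pvR (a b : Char) : Prop := ¬(a = '.' ∧ b = '.')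

-- the dot-collapsing step both programs perform
def pvStep (t : List Char) (x : Char) : List Char :=
  if x = '.' ∧ t.getLast? = some '.' then t else t ++ [x]

-- the stages of A's tail pipeline, and B's
def pvA1 (t : List Char) : List Char := if t.head? = some '.' then t.tail else t
def pvTrim (u : List Char) : List Char :=
  if u.length ≠ 0 ∧ u.getLast? = some '.' then u.dropLast else u
def pvA3 (u : List Char) : List Char := if u.length = 0 then ['a'] else u
def pvA4 (u : List Char) : List Char := if 16 ≤ u.length then u.take 15 else u
def pvPadA (u : List Char) : List Char :=
  if u.length ≤ 2 then u ++ List.replicate (3 - u.length) (PySem.List.pyGetD u (-1) 'a') else u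
def pvTailA (t : List Char) : List Char := pvPadA (pvTrim (pvA4 (pvA3 (pvTrim (pvA1 t)))))

def pvRstripDots (u : List Char) : List Char :=
  (u.reverse.dropWhile (fun c => (['.'] : List Char).contains c)).reverse
def pvA3' (u : List Char) : List Char := if u = [] then ['a'] else u
def pvPadB (u : List Char) : List Char :=
  u ++ List.replicate (3 - u.length) (PySem.List.pyGetD u (-1) 'a')
def pvTailB (t : List Char) : List Char :=
  pvPadB (pvRstripDots ((pvA3' (PySem.Chars.stripChars t ['.'])).take 15))

lemma pv_chain_step {t : List Char} (x : Char) (h : List.IsChain pvR t) :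
    List.IsChain pvR (pvStep t x) := by
  unfold pvStep
  split_ifs with hc
  · exact h
  · rw [List.isChain_append]
    refine ⟨h, by simp, ?_⟩
    intro a ha b hb
    simp only [List.head?_cons, Option.mem_def, Option.some.injEq] at hb
    subst hb
    intro ⟨ha', hx⟩
    exact hc ⟨hx, by simpa [ha'] using ha⟩

lemma pv_chain_foldl (l : List Char) (t : List Char) (h : List.IsChain pvR t) :
    List.IsChain pvR (l.foldl pvStep t) := by
  induction l generalizing t with
  | nil => exact h
  | cons x xs ih => exact ih _ (pv_chain_step x h)

lemma pv_chain_reverse {t : List Char} (h : List.IsChain pvR t) :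
    List.IsChain pvR t.reverse := by
  rw [List.isChain_reverse]
  exact h.imp (fun a b hab => by unfold pvR at *; tauto)

-- a left fold with a guarded append is the fold over the filtered list
lemma pv_foldl_if_eq_foldl_filter {β : Type} (P : Char → Prop) [DecidablePred P]
    (f : β → Char → β) (init : β) (l : List Char) :
    l.foldl (fun acc a => if P a then f acc a else acc) init =
      (l.filter (fun a => decide (P a))).foldl f init := by
  have h := List.foldl_filter (p := fun a => decide (P a)) (f := f) (l := l) (init := init)
  simpa [decide_eq_true_eq] using h.symm

-- the one-sided trims never see an empty list with a last '.'
lemma pv_trim_eq (u : List Char) :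
    pvTrim u = if u.getLast? = some '.' then u.dropLast else u := by
  unfold pvTrim
  by_cases h2 : u.getLast? = some '.'
  · have hne : u.length ≠ 0 := by
      rw [ne_eq, List.length_eq_zero_iff]; rintro rfl; simp at h2
    simp [h2, hne]
  · simp [h2]

-- dropping leading dots from a dot-collapsed list removes at most the head
lemma pv_lstrip {t : List Char} (h : List.IsChain pvR t) :
    t.dropWhile (fun c => (['.'] : List Char).contains c) = pvA1 t := by
  unfold pvA1
  match t with
  | [] => simp
  | a :: rest =>
    by_cases ha : a = '.'
    · subst ha
      match rest with
      | [] => simp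
      | b :: r =>
        have hb : b ≠ '.' := by
          rw [List.isChain_cons] at h
          have := h.1 b (by simp)
          unfold pvR at this; tauto
        simp [hb]
    · simp [ha]

-- dropping trailing dots from a dot-collapsed list removes at most the last element
lemma pv_rstrip {t : List Char} (h : List.IsChain pvR t) : pvRstripDots t = pvTrim t := by
  unfold pvRstripDots
  rw [pv_trim_eq, pv_lstrip (pv_chain_reverse h)]
  unfold pvA1
  rw [List.head?_reverse]
  split_ifs with hl
  · rw [List.tail_reverse, List.reverse_reverse]
  · rw [List.reverse_reverse]

lemma pv_a3'_eq (u : List Char) : pvA3' u = pvA3 u := by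
  unfold pvA3' pvA3
  simp [List.length_eq_zero_iff]

lemma pv_a4_eq (u : List Char) : pvA4 u = u.take 15 := by
  unfold pvA4
  split_ifs with h1
  · rfl
  · exact (List.take_of_length_le (by omega)).symm

lemma pv_pad_eq (u : List Char) : pvPadA u = pvPadB u := by
  unfold pvPadA pvPadB
  split_ifs with h
  · rfl
  · simp [Nat.sub_eq_zero_of_le (show 3 ≤ u.length by omega)]

-- A's tail pipeline equals B's on every dot-collapsed list
lemma pv_tail_eq (t : List Char) (h : List.IsChain pvR t) : pvTailA t = pvTailB t := by
  unfold pvTailA pvTailB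
  have hch1 : List.IsChain pvR (pvA1 t) := by
    unfold pvA1; split_ifs; exacts [h.tail, h]
  have hch2 : List.IsChain pvR (pvTrim (pvA1 t)) := by
    rw [pv_trim_eq]; split_ifs; exacts [hch1.dropLast, hch1]
  have hstrip : PySem.Chars.stripChars t ['.'] = pvTrim (pvA1 t) := by
    show pvRstripDots (t.dropWhile (fun c => (['.'] : List Char).contains c)) = _
    rw [pv_lstrip h, pv_rstrip hch1]
  rw [hstrip, pv_a3'_eq]
  have hch3 : List.IsChain pvR (pvA3 (pvTrim (pvA1 t))) := by
    unfold pvA3; split_ifs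
    · simp
    · exact hch2
  have hch4 : List.IsChain pvR ((pvA3 (pvTrim (pvA1 t))).take 15) := hch3.take 15
  rw [← pv_a4_eq] at hch4 ⊢
  rw [pv_rstrip hch4, pv_pad_eq]

-- A's first pass builds exactly the pvOk-filtered character list
lemma pv_foldA (l : List Char) :
    l.foldl (fun acc a =>
        if ((a.toNat : Int)) ∈ (PySem.List.pyRange 97 123 1 ++ PySem.List.pyRange 48 58 1 ++
          ([45, 95, 46] : List Int)) then acc ++ [a] else acc) [] =
      l.filter (fun a => pvOk a) := by
  rw [pv_foldl_if_eq_foldl_filter _ (fun acc a => acc ++ [a]),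
    PySem.List.foldl_append_singleton, List.nil_append]
  refine List.filter_congr (fun c _ => ?_)
  rw [Bool.eq_iff_iff, decide_eq_true_eq]
  exact pv_cond_eq c

-- B's fused pass is the fold of the collapsing step over the filtered list
lemma pv_foldB (l : List Char) :
    l.foldl (fun acc ch =>
        if (('a' ≤ ch ∧ ch ≤ 'z') ∨ ('0' ≤ ch ∧ ch ≤ '9') ∨ ch ∈ (['-', '_', '.'] : List Char))
            ∧ ¬(ch = '.' ∧ acc ≠ [] ∧ acc.getLast? = some '.')
        then acc ++ [ch] else acc) [] =
      (l.filter (fun a => pvOk a)).foldl pvStep [] := by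
  have hstep : (fun (acc : List Char) ch =>
      if (('a' ≤ ch ∧ ch ≤ 'z') ∨ ('0' ≤ ch ∧ ch ≤ '9') ∨ ch ∈ (['-', '_', '.'] : List Char))
          ∧ ¬(ch = '.' ∧ acc ≠ [] ∧ acc.getLast? = some '.')
      then acc ++ [ch] else acc) =
      fun acc ch => if pvOk ch = true then pvStep acc ch else acc := by
    funext acc ch
    have hne : acc.getLast? = some '.' → acc ≠ [] := by
      intro h; rintro rfl; simp at h
    simp only [pv_ok_iff]
    unfold pvStep
    split_ifs <;> tauto
  rw [hstep, pv_foldl_if_eq_foldl_filter]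
  simp only [Bool.decide_eq_true]

-- ===== VERDICT (by name: the statement is the Claim_ definition above) =====
theorem solution_spec : Claim_equal_solution := by
  intro new_id _hdom hpre
  unfold Spec_solution
  simp only [solution, solution_alt, PySem.Str.toList_lower]
  rw [pv_foldA, pv_foldB]
  obtain ⟨c, hc, hok⟩ := List.any_eq_true.mp hpre
  have hmem : c ∈ (PySem.Chars.lower new_id.toList).filter (fun a => pvOk a) :=
    List.mem_filter.mpr ⟨hc, hok⟩
  cases hF : (PySem.Chars.lower new_id.toList).filter (fun a => pvOk a) with
  | nil => rw [hF] at hmem; cases hmem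
  | cons c0 rest =>
    show String.ofList (pvTailA (rest.foldl pvStep [c0])) =
      String.ofList (pvTailB ((c0 :: rest).foldl pvStep []))
    have hstart : (c0 :: rest).foldl pvStep [] = rest.foldl pvStep [c0] := by
      rw [List.foldl_cons]
      congr 1
      unfold pvStep
      simp
    rw [hstart]
    exact congrArg _ (pv_tail_eq _ (pv_chain_foldl rest [c0] (by simp)))

set_option maxRecDepth 4096 in
@[simp]
theorem solution_raises : Claim_raises_solution := by
  unfold Claim_raises_solution
  refine ⟨?_, ?_, ?_, ?_⟩
  · intro new_id _hdom hr hpre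
    obtain ⟨c, hc, hok⟩ := List.any_eq_true.mp hpre
    exact hr c hc (by simp at hok ⊢; tauto)
  · show Dom_solution "!"
    decide
  · show Raises_solution "!"
    intro c hc
    rw [show PySem.Chars.lower "!".toList = ['!'] from rfl] at hc
    simp only [List.mem_singleton] at hc
    subst hc
    decide
  · show solution_alt "!" = "aaa"
    decide
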